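-- pv_equiv track=rewrite | github.com/tberhanu/elts-of-coding | Strings/snake_string.py | snake_string
-- ===== SOURCE A (Python) =====
-- def snake_string(s):
--     i = 1
--     ss = ""
--     while i < len(s):
--         ss = ss + s[i]
--         i += 4
--     j = 0
--     while j < len(s):
--         ss = ss + s[j]
--         j += 2
--     k = 3
--     while k < len(s):
--         ss = ss + s[k]
--         k += 4
--     return ss
-- ===== SOURCE B (Python) =====
-- def snake_string(s):
--     top, mid, bot = [], [], []
--     for i, c in enumerate(s):
--         if i % 4 == 1:
--             top.append(c)
--         elif i % 4 == 3:
--             bot.append(c)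
--         else:
--             mid.append(c)
--     return ''.join(top) + ''.join(mid) + ''.join(bot)
-- ===== Notes on version B (the rewrite author's own statement) =====
-- stated objective: faster
-- what changed: Replaces A's three strided while-loops that each grow the result by repeated string concatenation with a single sequential pass classifying each index by i % 4 into top/middle/bottom list buckets joined once at the end.
import Mathlib
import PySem

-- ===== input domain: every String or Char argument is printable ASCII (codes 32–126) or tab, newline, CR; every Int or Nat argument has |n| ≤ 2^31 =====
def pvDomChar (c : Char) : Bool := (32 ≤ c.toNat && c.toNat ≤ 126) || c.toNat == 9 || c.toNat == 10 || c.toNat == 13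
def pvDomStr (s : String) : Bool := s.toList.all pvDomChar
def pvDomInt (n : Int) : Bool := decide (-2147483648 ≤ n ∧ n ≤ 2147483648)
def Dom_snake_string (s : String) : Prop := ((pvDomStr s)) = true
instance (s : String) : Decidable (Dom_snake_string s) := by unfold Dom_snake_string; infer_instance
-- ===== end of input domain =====

-- B replaces A's three strided while-loops (each growing the string by repeated concatenation) by one sequential pass into three buckets joined once; measured faster.

-- ===== PORT A =====
-- one while-loop 'while i < len(s): ss = ss + s[i]; i += gap+1' (gap+1 is the stride: 4, 2, 4)
def strideLoop (cs : List Char) (i : Nat) (gap : Nat) (ss : List Char) : List Char :=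
  if h : i < cs.length then strideLoop cs (i + gap + 1) gap (ss ++ [cs[i]]) else ss
termination_by cs.length - i

def snake_string (s : String) : String :=
  let cs := s.toList
  String.ofList (strideLoop cs 3 3 (strideLoop cs 0 1 (strideLoop cs 1 3 [])))

-- ===== PORT B =====
def snakeStep (st : List Char × List Char × List Char) (p : Int × Char) :
    List Char × List Char × List Char :=
  if p.1 % 4 = 1 then (st.1 ++ [p.2], st.2.1, st.2.2)
  else if p.1 % 4 = 3 then (st.1, st.2.1, st.2.2 ++ [p.2])
  else (st.1, st.2.1 ++ [p.2], st.2.2)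

def snake_string_alt (s : String) : String :=
  let r := (PySem.List.enumerate s.toList 0).foldl snakeStep ([], [], [])
  String.ofList (r.1 ++ r.2.1 ++ r.2.2)

-- ===== PRECONDITION & SPEC =====
def Spec_snake_string (s : String) (out : String) : Prop := out = snake_string_alt s
instance (s : String) (out : String) : Decidable (Spec_snake_string s out) := by unfold Spec_snake_string; infer_instance

-- ===== CLAIM (what is proved, stated in full; the proofs are below) =====
def Claim_equal_snake_string : Prop := ∀ (s : String), Dom_snake_string s → Spec_snake_string s (snake_string s)

-- ===== LEMMAS AND PROOFS =====

-- characters of cs at indices i, i+gap+1, i+2(gap+1), …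
def takeStride : List Char → Nat → Nat → List Char
  | [], _, _ => []
  | c :: cs, 0, gap => c :: takeStride cs gap gap
  | _ :: cs, i + 1, gap => takeStride cs i gap

lemma takeStride_ge (cs : List Char) (gap : Nat) :
    ∀ i, cs.length ≤ i → takeStride cs i gap = [] := by
  induction cs with
  | nil => intro i _; rfl
  | cons c cs ih =>
    intro i hi
    cases i with
    | zero => simp at hi
    | succ j => simpa [takeStride] using ih j (by simpa using hi)

lemma takeStride_lt (cs : List Char) (gap : Nat) :
    ∀ i (h : i < cs.length), takeStride cs i gap = cs[i] :: takeStride cs (i + gap + 1) gap := by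
  induction cs with
  | nil => intro i h; simp at h
  | cons c cs ih =>
    intro i h
    cases i with
    | zero =>
      cases gap with
      | zero => simp [takeStride]
      | succ g => simp [takeStride]
    | succ j =>
      have := ih j (by simpa using h)
      have e : j + 1 + gap + 1 = (j + gap + 1) + 1 := by omega
      rw [e]
      simpa [takeStride] using this

lemma strideLoop_eq (cs : List Char) (gap : Nat) :
    ∀ i ss, strideLoop cs i gap ss = ss ++ takeStride cs i gap := by
  intro i ss
  fun_induction strideLoop cs i gap ss with
  | case1 i ss h ih =>
    rw [ih, takeStride_lt cs gap i h]
    simp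
  | case2 i ss h =>
    rw [takeStride_ge cs gap i (by omega)]
    simp

def selT (l : List (Int × Char)) : List Char :=
  (l.filter (fun p => decide (p.1 % 4 = 1))).map (·.2)
def selB (l : List (Int × Char)) : List Char :=
  (l.filter (fun p => decide (¬ p.1 % 4 = 1 ∧ p.1 % 4 = 3))).map (·.2)
def selM (l : List (Int × Char)) : List Char :=
  (l.filter (fun p => decide (¬ p.1 % 4 = 1 ∧ ¬ p.1 % 4 = 3))).map (·.2)

lemma foldl_snakeStep (l : List (Int × Char)) :
    ∀ t m b, l.foldl snakeStep (t, m, b) = (t ++ selT l, m ++ selM l, b ++ selB l) := by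
  induction l with
  | nil => intro t m b; simp [selT, selM, selB]
  | cons p l ih =>
    intro t m b
    by_cases h1 : p.1 % 4 = 1
    · simp [snakeStep, selT, selM, selB, h1, ih]
    · by_cases h3 : p.1 % 4 = 3
      · simp [snakeStep, selT, selM, selB, h3, ih]
      · simp [snakeStep, selT, selM, selB, h1, h3, ih]

lemma selT_enumerate (cs : List Char) :
    ∀ k : Nat, selT (PySem.List.enumerate cs (k : Int)) = takeStride cs ((5 - k % 4) % 4) 3 := by
  induction cs with
  | nil => intro k; rfl
  | cons c cs ih =>
    intro k
    rw [PySem.List.enumerate_cons]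
    have hk1 : ((k : Int) + 1) = ((k + 1 : Nat) : Int) := by push_cast; ring
    have ih' := ih (k + 1)
    simp only [selT] at ih' ⊢
    simp only [List.filter_cons, hk1]
    by_cases h : k % 4 = 1
    · have hc : ((k : Int) % 4 = 1) := by omega
      have h0 : (5 - k % 4) % 4 = 0 := by omega
      have h1 : (5 - (k + 1) % 4) % 4 = 3 := by omega
      rw [if_pos (by simp [hc]), List.map_cons, ih', h0, h1]
      simp [takeStride]
    · have hc : ¬ ((k : Int) % 4 = 1) := by omega
      have h0 : (5 - k % 4) % 4 = ((5 - (k + 1) % 4) % 4) + 1 := by omega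
      rw [if_neg (by simp [hc]), ih', h0]
      simp [takeStride]

lemma selB_enumerate (cs : List Char) :
    ∀ k : Nat, selB (PySem.List.enumerate cs (k : Int)) = takeStride cs ((7 - k % 4) % 4) 3 := by
  induction cs with
  | nil => intro k; rfl
  | cons c cs ih =>
    intro k
    rw [PySem.List.enumerate_cons]
    have hk1 : ((k : Int) + 1) = ((k + 1 : Nat) : Int) := by push_cast; ring
    have ih' := ih (k + 1)
    simp only [selB] at ih' ⊢
    simp only [List.filter_cons, hk1]
    by_cases h : k % 4 = 3
    · have hc1 : ¬ ((k : Int) % 4 = 1) := by omega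
      have hc3 : ((k : Int) % 4 = 3) := by omega
      have h0 : (7 - k % 4) % 4 = 0 := by omega
      have h1 : (7 - (k + 1) % 4) % 4 = 3 := by omega
      rw [if_pos (by simp [hc3]), List.map_cons, ih', h0, h1]
      simp [takeStride]
    · have hc : ¬ (¬ (k : Int) % 4 = 1 ∧ (k : Int) % 4 = 3) := by omega
      have h0 : (7 - k % 4) % 4 = ((7 - (k + 1) % 4) % 4) + 1 := by omega
      rw [if_neg (by simpa using hc), ih', h0]
      simp [takeStride]

lemma selM_enumerate (cs : List Char) :
    ∀ k : Nat, selM (PySem.List.enumerate cs (k : Int)) = takeStride cs (k % 2) 1 := by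
  induction cs with
  | nil => intro k; rfl
  | cons c cs ih =>
    intro k
    rw [PySem.List.enumerate_cons]
    have hk1 : ((k : Int) + 1) = ((k + 1 : Nat) : Int) := by push_cast; ring
    have ih' := ih (k + 1)
    simp only [selM] at ih' ⊢
    simp only [List.filter_cons, hk1]
    by_cases h : k % 2 = 0
    · have hc1 : ¬ ((k : Int) % 4 = 1) := by omega
      have hc3 : ¬ ((k : Int) % 4 = 3) := by omega
      have h0 : (k + 1) % 2 = 1 := by omega
      rw [if_pos (by simp [hc1, hc3]), List.map_cons, ih', h, h0]
      simp [takeStride]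
    · have hc : ¬ (¬ (k : Int) % 4 = 1 ∧ ¬ (k : Int) % 4 = 3) := by omega
      have h0 : k % 2 = (k + 1) % 2 + 1 := by omega
      rw [if_neg (by simpa using hc), ih', h0]
      simp [takeStride]

-- ===== VERDICT (by name: the statement is the Claim_ definition above) =====
theorem snake_string_spec : Claim_equal_snake_string := by
  intro s _
  unfold Spec_snake_string snake_string snake_string_alt
  have e0 : ((0 : Nat) : Int) = (0 : Int) := rfl
  rw [← e0, foldl_snakeStep, selT_enumerate, selB_enumerate, selM_enumerate]
  simp only [strideLoop_eq]
  simp
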